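-- pv_equiv track=rewrite | github.com/RayolaRayons/PopMenuHero | mnu_parser.py | _tokenize_line
-- ===== SOURCE A (Python) =====
-- from typing import List, Optional, Any
--
-- def _tokenize_line(line: str) -> List[str]:
--     """
--     Tokenize a single line, handling quoted strings and <& &> blocks.
--     Returns list of raw tokens (still quoted).
--     """
--     tokens = []
--     i = 0
--     line = line.strip()
--     while i < len(line):
--         # Skip whitespace
--         if line[i].isspace():
--             i += 1
--             continue
--         # Comment - rest of line is one token
--         if line[i:i+2] == '//':
--             tokens.append(line[i:])
--             break
--         # <& ... &> token
--         if line[i:i+2] == '<&':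
--             end = line.find('&>', i + 2)
--             if end == -1:
--                 tokens.append(line[i:])
--                 break
--             tokens.append(line[i:end+2])
--             i = end + 2
--             continue
--         # Quoted string
--         if line[i] == '"':
--             j = i + 1
--             while j < len(line) and line[j] != '"':
--                 if line[j] == '\\':
--                     j += 1  # skip escaped char
--                 j += 1
--             tokens.append(line[i:j+1])
--             i = j + 1
--             continue
--         # Bare word (keyword, DIVIDER, {, })
--         j = i
--         while j < len(line) and not line[j].isspace() and line[j] not in ('"',):
--             if line[j:j+2] in ('<&',):
--                 break
--             j += 1
--         tokens.append(line[i:j])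
--         i = j
--     return tokens
-- ===== SOURCE B (Python) =====
-- # Single-pass character state machine (NORMAL/WORD/QUOTE/BLOCK) instead of
-- # nested index scans: one while loop, an explicit state and a token accumulator.
-- _N, _W, _Q, _B = 0, 1, 2, 3
--
-- def _tokenize_line(line):
--     line = line.strip()
--     n = len(line)
--     tokens = []
--     state = _N
--     acc = []            # chars of the token being built
--     i = 0
--     while i < n:
--         c = line[i]
--         if state == _N:
--             if c.isspace():
--                 i += 1
--             elif line.startswith('//', i):
--                 tokens.append(line[i:])
--                 return tokens
--             elif line.startswith('<&', i):
--                 state = _B; acc = ['<', '&']; i += 2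
--             elif c == '"':
--                 state = _Q; acc = ['"']; i += 1
--             else:
--                 state = _W; acc = [c]; i += 1
--         elif state == _W:
--             if c.isspace() or c == '"' or line.startswith('<&', i):
--                 tokens.append(''.join(acc)); acc = []; state = _N
--             else:
--                 acc.append(c); i += 1
--         elif state == _Q:
--             if c == '\\':
--                 acc.append(c)
--                 acc.extend(line[i + 1:i + 2])
--                 i += 2
--             elif c == '"':
--                 acc.append(c)
--                 tokens.append(''.join(acc)); acc = []; state = _N
--                 i += 1
--             else:
--                 acc.append(c); i += 1
--         else:  # _B
--             if line.startswith('&>', i):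
--                 acc.extend(['&', '>'])
--                 tokens.append(''.join(acc)); acc = []; state = _N
--                 i += 2
--             else:
--                 acc.append(c); i += 1
--     if state != _N:
--         tokens.append(''.join(acc))
--     return tokens
-- ===== Notes on version B (the rewrite author's own statement) =====
-- stated objective: alternative
-- what changed: Replaced the outer index loop with nested per-token scanning loops (and str.find for blocks) by a single-pass character state machine with states NORMAL/WORD/QUOTE/BLOCK and an explicit token accumulator.
import Mathlib
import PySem

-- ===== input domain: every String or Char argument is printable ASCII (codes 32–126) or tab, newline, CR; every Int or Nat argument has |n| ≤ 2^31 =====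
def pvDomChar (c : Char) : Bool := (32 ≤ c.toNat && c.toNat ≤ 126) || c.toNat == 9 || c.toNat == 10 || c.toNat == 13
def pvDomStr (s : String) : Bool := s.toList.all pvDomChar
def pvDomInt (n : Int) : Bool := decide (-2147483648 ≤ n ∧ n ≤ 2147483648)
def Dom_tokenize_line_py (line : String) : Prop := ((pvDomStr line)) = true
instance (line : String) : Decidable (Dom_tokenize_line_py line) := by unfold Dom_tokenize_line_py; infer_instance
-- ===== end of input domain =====

-- B replaces A's nested per-token index scans by a single-pass character state machine; same tokens, alternative decomposition.

-- ===== PORT A =====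
-- A's inner quote scan: j = i+1; while j < len and line[j] != '"': if line[j] == '\': j += 1; j += 1
def pvQuoteEnd (cs : List Char) (j : Nat) : Nat :=
  if h : j < cs.length then
    if cs[j] ≠ '"' then
      if cs[j] = '\\' then pvQuoteEnd cs (j + 2) else pvQuoteEnd cs (j + 1)
    else j
  else j
termination_by cs.length - j

-- A's bare-word scan: while j < len and not space and line[j] != '"': if line[j:j+2] == '<&': break; j += 1
def pvWordEnd (cs : List Char) (j : Nat) : Nat :=
  if h : j < cs.length then
    if ¬ PySem.Chars.isspace cs[j] ∧ cs[j] ≠ '"' then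
      if (cs.drop j).take 2 = ['<', '&'] then j
      else pvWordEnd cs (j + 1)
    else j
  else j
termination_by cs.length - j

-- lemmas the port's termination proof cites
theorem pvQuoteEnd_ge (cs : List Char) (j : Nat) : j ≤ pvQuoteEnd cs j := by
  fun_induction pvQuoteEnd cs j with
  | case1 j h hq hb ih => omega
  | case2 j h hq hb ih => omega
  | case3 j h hq => omega
  | case4 j h => omega

theorem pvWordEnd_ge (cs : List Char) (j : Nat) : j ≤ pvWordEnd cs j := by
  fun_induction pvWordEnd cs j with
  | case1 => omega
  | case2 j h hc hb ih => omega
  | case3 => omega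
  | case4 => omega

theorem pvWordEnd_gt (cs : List Char) (i : Nat) (h : i < cs.length)
    (hs : ¬ PySem.Chars.isspace cs[i]) (hq : cs[i] ≠ '"')
    (hb : (cs.drop i).take 2 ≠ ['<', '&']) : i < pvWordEnd cs i := by
  unfold pvWordEnd
  rw [dif_pos h, if_pos ⟨hs, hq⟩, if_neg hb]
  have := pvWordEnd_ge cs (i + 1)
  omega

theorem pvTake2_len {cs : List Char} {i : Nat} {a b : Char}
    (h : (cs.drop i).take 2 = [a, b]) : i + 2 ≤ cs.length := by
  have h2 : ((cs.drop i).take 2).length = 2 := by rw [h]; rfl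
  simp only [List.length_take, List.length_drop] at h2
  omega

theorem pvFindFromGt (cs : List Char) (i : Nat) (hlen : i + 2 ≤ cs.length)
    (hne : PySem.Chars.findFrom cs ['&', '>'] ((i : Int) + 2) ≠ -1) :
    i < (PySem.Chars.findFrom cs ['&', '>'] ((i : Int) + 2)).toNat + 2 := by
  have hc : ((i : Int) + 2) = ((i + 2 : Nat) : Int) := by push_cast; ring
  rw [hc] at hne ⊢
  have := (PySem.Chars.findFrom_natCast_spec cs ['&', '>'] (i + 2) hlen hne).1
  omega

-- A's outer while loop over index i into the stripped line (slices line[a:b] = (drop a).take (b-a), exact for these natural bounds)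
def pvLoopA (cs : List Char) (i : Nat) : List String :=
  if h : i < cs.length then
    if PySem.Chars.isspace cs[i] then pvLoopA cs (i + 1)
    else if (cs.drop i).take 2 = ['/', '/'] then [String.ofList (cs.drop i)]
    else if hblk : (cs.drop i).take 2 = ['<', '&'] then
      let e := PySem.Chars.findFrom cs ['&', '>'] ((i : Int) + 2)
      if hend : e = -1 then [String.ofList (cs.drop i)]
      else String.ofList ((cs.drop i).take (e.toNat + 2 - i)) :: pvLoopA cs (e.toNat + 2)
    else if cs[i] = '"' then
      let j := pvQuoteEnd cs (i + 1)
      String.ofList ((cs.drop i).take (j + 1 - i)) :: pvLoopA cs (j + 1)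
    else
      let j := pvWordEnd cs i
      String.ofList ((cs.drop i).take (j - i)) :: pvLoopA cs j
  else []
termination_by cs.length - i
decreasing_by
  · omega
  · have := pvFindFromGt cs i (pvTake2_len hblk) hend; omega
  · have := pvQuoteEnd_ge cs (i + 1); omega
  · have hs : ¬ PySem.Chars.isspace cs[i] := by assumption
    have hq : cs[i] ≠ '"' := by assumption
    have hb : (cs.drop i).take 2 ≠ ['<', '&'] := by assumption
    have := pvWordEnd_gt cs i h hs hq hb; omega

def tokenize_line_py (line : String) : List String :=
  pvLoopA (PySem.Str.strip line).toList 0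

-- ===== PORT B =====
-- B's machine state: NORMAL, or mid-token (word / quoted string / <& block) with the accumulated chars
inductive PvSt : Type
  | n : PvSt
  | w : List Char → PvSt
  | q : List Char → PvSt
  | b : List Char → PvSt
deriving DecidableEq, Repr

def pvRank : PvSt → Nat
  | .w _ => 1
  | _ => 0

-- B's single while loop: one step per character, state + accumulator
def pvStepB : List Char → PvSt → List String
  | [], .n => []
  | [], .w acc => [String.ofList acc]
  | [], .q acc => [String.ofList acc]
  | [], .b acc => [String.ofList acc]
  | c :: cs, .n =>
    if PySem.Chars.isspace c then pvStepB cs .n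
    else if ['/', '/'].isPrefixOf (c :: cs) then [String.ofList (c :: cs)]
    else if ['<', '&'].isPrefixOf (c :: cs) then pvStepB cs.tail (.b ['<', '&'])
    else if c = '"' then pvStepB cs (.q ['"'])
    else pvStepB cs (.w [c])
  | c :: cs, .w acc =>
    if PySem.Chars.isspace c ∨ c = '"' ∨ ['<', '&'].isPrefixOf (c :: cs) then
      String.ofList acc :: pvStepB (c :: cs) .n
    else pvStepB cs (.w (acc ++ [c]))
  | c :: cs, .q acc =>
    if c = '\\' then
      match cs with
      | [] => pvStepB [] (.q (acc ++ [c]))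
      | d :: r => pvStepB r (.q (acc ++ [c, d]))
    else if c = '"' then String.ofList (acc ++ [c]) :: pvStepB cs .n
    else pvStepB cs (.q (acc ++ [c]))
  | c :: cs, .b acc =>
    if ['&', '>'].isPrefixOf (c :: cs) then
      String.ofList (acc ++ ['&', '>']) :: pvStepB cs.tail .n
    else pvStepB cs (.b (acc ++ [c]))
termination_by rest st => (rest.length, pvRank st)
decreasing_by all_goals (simp_all [pvRank]; omega)

def tokenize_line_py_alt (line : String) : List String :=
  pvStepB (PySem.Str.strip line).toList .n

-- ===== PRECONDITION & SPEC =====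
def Spec_tokenize_line_py (line : String) (out : List String) : Prop := out = tokenize_line_py_alt line
instance (line : String) (out : List String) : Decidable (Spec_tokenize_line_py line out) := by unfold Spec_tokenize_line_py; infer_instance

-- ===== CLAIM (what is proved, stated in full; the proofs are below) =====
def Claim_equal_tokenize_line_py : Prop := ∀ (line : String), Dom_tokenize_line_py line → Spec_tokenize_line_py line (tokenize_line_py line)

-- ===== LEMMAS AND PROOFS =====

theorem pvDropCons {cs : List Char} {j : Nat} (h : j < cs.length) :
    cs.drop j = cs[j] :: cs.drop (j + 1) := List.drop_eq_getElem_cons h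

theorem pvTake2_drop {cs : List Char} {i : Nat} {a b : Char}
    (h : (cs.drop i).take 2 = [a, b]) : cs.drop i = a :: b :: cs.drop (i + 2) := by
  have hl := pvTake2_len h
  have h1 : i < cs.length := by omega
  have h2 : i + 1 < cs.length := by omega
  rw [pvDropCons h1, pvDropCons h2] at h
  simp only [List.take_succ_cons, List.take_zero, List.cons.injEq, and_true] at h
  obtain ⟨ha, hb⟩ := h
  rw [pvDropCons h1, pvDropCons h2, ha, hb]

theorem pvPrefix2 (a b : Char) (l : List Char) :
    ([a, b] : List Char).isPrefixOf l = true ↔ l.take 2 = [a, b] := by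
  rw [List.isPrefixOf_iff_prefix, List.prefix_iff_eq_take]
  constructor <;> (intro h; exact h.symm)

theorem pvGoShift (sub : List Char) : ∀ (r : List Char) (k : Nat),
    PySem.Chars.find.go sub r k =
      if PySem.Chars.find.go sub r 0 = -1 then -1 else (k : Int) + PySem.Chars.find.go sub r 0 := by
  intro r
  induction r with
  | nil =>
    intro k
    rw [PySem.Chars.find.go.eq_def, PySem.Chars.find.go.eq_def]
    split_ifs <;> simp_all
  | cons c t ih =>
    intro k
    rw [PySem.Chars.find.go.eq_def sub (c :: t) k, PySem.Chars.find.go.eq_def sub (c :: t) 0]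
    simp only
    by_cases hp : sub.isPrefixOf (c :: t)
    · simp [hp]
    · simp only [hp]
      rw [ih (k + 1), ih 1]
      have hge : -1 ≤ PySem.Chars.find.go sub t 0 := PySem.Chars.neg_one_le_find t sub
      split_ifs <;> push_cast <;> omega

theorem pvFindCons (sub : List Char) (c : Char) (t : List Char) :
    PySem.Chars.find (c :: t) sub =
      if sub.isPrefixOf (c :: t) then 0
      else (if PySem.Chars.find t sub = -1 then -1 else 1 + PySem.Chars.find t sub) := by
  show PySem.Chars.find.go sub (c :: t) 0 = _
  rw [PySem.Chars.find.go.eq_def]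
  simp only
  by_cases hp : sub.isPrefixOf (c :: t)
  · simp [hp]
  · simp only [hp]
    rw [pvGoShift]
    show (if PySem.Chars.find t sub = -1 then -1 else ((1 : Nat) : Int) + PySem.Chars.find t sub) = _
    norm_num

theorem pvBlockCorr : ∀ (l acc : List Char),
    pvStepB l (.b acc) =
      if PySem.Chars.find l ['&', '>'] = -1 then [String.ofList (acc ++ l)]
      else String.ofList (acc ++ l.take ((PySem.Chars.find l ['&', '>']).toNat + 2)) ::
        pvStepB (l.drop ((PySem.Chars.find l ['&', '>']).toNat + 2)) .n := by
  intro l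
  induction l with
  | nil =>
    intro acc
    have hf : PySem.Chars.find [] ['&', '>'] = -1 := by decide
    simp [pvStepB, hf]
  | cons c t ih =>
    intro acc
    by_cases hp : (['&', '>'] : List Char).isPrefixOf (c :: t)
    · have hf : PySem.Chars.find (c :: t) ['&', '>'] = 0 := by rw [pvFindCons]; simp [hp]
      obtain ⟨r, hr⟩ := List.isPrefixOf_iff_prefix.1 hp
      simp only [List.cons_append, List.nil_append, List.cons.injEq] at hr
      obtain ⟨hc, ht⟩ := hr
      subst hc; subst ht
      simp [pvStepB, hf]
    · have hge : -1 ≤ PySem.Chars.find t ['&', '>'] := PySem.Chars.neg_one_le_find t _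
      have hstep : pvStepB (c :: t) (.b acc) = pvStepB t (.b (acc ++ [c])) := by
        simp [pvStepB, hp]
      by_cases hft : PySem.Chars.find t ['&', '>'] = -1
      · have hf : PySem.Chars.find (c :: t) ['&', '>'] = -1 := by rw [pvFindCons]; simp [hp, hft]
        rw [hstep, ih, hf]
        simp [hft]
      · have h0 : 0 ≤ PySem.Chars.find t ['&', '>'] := by omega
        have hf : PySem.Chars.find (c :: t) ['&', '>'] = 1 + PySem.Chars.find t ['&', '>'] := by
          rw [pvFindCons]; simp [hp, hft]
        have h1 : ¬ (1 + PySem.Chars.find t ['&', '>'] = -1) := by omega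
        rw [hstep, ih]
        simp only [hft, if_false]
        rw [hf, if_neg h1,
            show (1 + PySem.Chars.find t ['&', '>']).toNat
              = (PySem.Chars.find t ['&', '>']).toNat + 1 by omega,
            show (PySem.Chars.find t ['&', '>']).toNat + 1 + 2
              = ((PySem.Chars.find t ['&', '>']).toNat + 2) + 1 by omega]
        simp [List.take_succ_cons, List.drop_succ_cons, List.append_assoc]

theorem pvDropCons2 {cs : List Char} {j : Nat} (h : j + 1 < cs.length) :
    cs.drop (j + 1) = cs[j + 1] :: cs.drop (j + 2) := pvDropCons h

theorem pvStepB_q_bs (d : Char) (r acc : List Char) :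
    pvStepB ('\\' :: d :: r) (.q acc) = pvStepB r (.q (acc ++ ['\\', d])) := by
  rw [pvStepB.eq_def]
  simp

theorem pvStepB_q_chr (c : Char) (r acc : List Char) (hb : c ≠ '\\') (hq : c ≠ '"') :
    pvStepB (c :: r) (.q acc) = pvStepB r (.q (acc ++ [c])) := by
  rw [pvStepB.eq_def]
  simp only
  rw [if_neg hb, if_neg hq]

theorem pvStepB_q_close (r acc : List Char) :
    pvStepB ('"' :: r) (.q acc) = String.ofList (acc ++ ['"']) :: pvStepB r .n := by
  rw [pvStepB.eq_def]
  simp only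
  rw [if_neg (show ('"' : Char) ≠ '\\' by decide)]
  simp

theorem pvStepB_w_step (c : Char) (r acc : List Char) (hs : ¬ PySem.Chars.isspace c)
    (hq : c ≠ '"') (hnp : ¬ (['<','&'] : List Char).isPrefixOf (c :: r) = true) :
    pvStepB (c :: r) (.w acc) = pvStepB r (.w (acc ++ [c])) := by
  rw [pvStepB.eq_def]
  simp only
  rw [if_neg (by tauto)]

theorem pvStepB_w_stop (c : Char) (r acc : List Char)
    (h : PySem.Chars.isspace c = true ∨ c = '"' ∨ (['<','&'] : List Char).isPrefixOf (c :: r) = true) :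
    pvStepB (c :: r) (.w acc) = String.ofList acc :: pvStepB (c :: r) .n := by
  rw [pvStepB.eq_def]
  simp only
  rw [if_pos (by tauto)]

theorem pvQuoteCorr (cs : List Char) (j : Nat) : ∀ acc : List Char,
    pvStepB (cs.drop j) (.q acc) =
      if pvQuoteEnd cs j < cs.length then
        String.ofList (acc ++ (cs.drop j).take (pvQuoteEnd cs j + 1 - j)) ::
          pvStepB (cs.drop (pvQuoteEnd cs j + 1)) .n
      else [String.ofList (acc ++ cs.drop j)] := by
  fun_induction pvQuoteEnd cs j with
  | case1 j h hq hb ih =>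
    intro acc
    rw [pvDropCons h, hb]
    by_cases h2 : j + 1 < cs.length
    · rw [pvDropCons2 h2, pvStepB_q_bs, ih]
      have hge := pvQuoteEnd_ge cs (j + 2)
      split_ifs with hlt
      · rw [show pvQuoteEnd cs (j+2) + 1 - j = (pvQuoteEnd cs (j+2) + 1 - (j+2)) + 1 + 1 by omega,
            List.take_succ_cons, List.take_succ_cons]
        simp [List.append_assoc]
      · simp [List.append_assoc]
    · have hnil : cs.drop (j+1) = [] := List.drop_eq_nil_of_le (by omega)
      rw [hnil]
      have he : pvQuoteEnd cs (j+2) = j + 2 := by unfold pvQuoteEnd; rw [dif_neg (by omega)]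
      rw [he, if_neg (by omega)]
      simp [pvStepB]
  | case2 j h hq hb ih =>
    intro acc
    rw [pvDropCons h, pvStepB_q_chr cs[j] _ acc hb hq, ih]
    have hge := pvQuoteEnd_ge cs (j + 1)
    split_ifs with hlt
    · rw [show pvQuoteEnd cs (j+1) + 1 - j = (pvQuoteEnd cs (j+1) + 1 - (j+1)) + 1 by omega,
          List.take_succ_cons]
      simp [List.append_assoc]
    · simp [List.append_assoc]
  | case3 j h hq =>
    intro acc
    have hq' : cs[j] = '"' := by tauto
    rw [pvDropCons h, hq', pvStepB_q_close, if_pos h, show j + 1 - j = 1 by omega]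
    simp
  | case4 j h =>
    intro acc
    have hnil : cs.drop j = [] := List.drop_eq_nil_of_le (by omega)
    rw [hnil, if_neg (by omega)]
    simp [pvStepB]

theorem pvWordCorr (cs : List Char) (j : Nat) : ∀ acc : List Char,
    pvStepB (cs.drop j) (.w acc) =
      String.ofList (acc ++ (cs.drop j).take (pvWordEnd cs j - j)) ::
        pvStepB (cs.drop (pvWordEnd cs j)) .n := by
  fun_induction pvWordEnd cs j with
  | case1 j h hc hb =>
    intro acc
    have hb' := hb
    rw [pvDropCons h] at hb'
    have hpre := (pvPrefix2 '<' '&' _).2 hb'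
    rw [show j - j = 0 by omega, pvDropCons h,
        pvStepB_w_stop cs[j] _ acc (Or.inr (Or.inr hpre))]
    simp
  | case2 j h hc hb ih =>
    intro acc
    obtain ⟨hs, hq⟩ := hc
    have hnp : ¬ ((['<','&'] : List Char).isPrefixOf (cs.drop j) = true) :=
      fun hx => hb ((pvPrefix2 _ _ _).1 hx)
    rw [pvDropCons h] at hnp
    rw [pvDropCons h, pvStepB_w_step cs[j] _ acc hs hq hnp, ih]
    have hge := pvWordEnd_ge cs (j + 1)
    rw [show pvWordEnd cs (j+1) - j = (pvWordEnd cs (j+1) - (j+1)) + 1 by omega,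
        List.take_succ_cons]
    simp [List.append_assoc]
  | case3 j h hc =>
    intro acc
    have hor : PySem.Chars.isspace cs[j] = true ∨ cs[j] = '"' := by tauto
    rw [show j - j = 0 by omega, pvDropCons h,
        pvStepB_w_stop cs[j] _ acc (by tauto)]
    simp
  | case4 j h =>
    intro acc
    have hnil : cs.drop j = [] := List.drop_eq_nil_of_le (by omega)
    rw [hnil]
    simp [pvStepB]

theorem pvStepB_n_ws (c : Char) (r : List Char) (hs : PySem.Chars.isspace c = true) :
    pvStepB (c :: r) .n = pvStepB r .n := by
  rw [pvStepB.eq_def]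
  simp only
  rw [if_pos hs]

theorem pvStepB_n_comment (c : Char) (r : List Char) (hs : ¬ PySem.Chars.isspace c = true)
    (hcm : (['/','/'] : List Char).isPrefixOf (c :: r) = true) :
    pvStepB (c :: r) .n = [String.ofList (c :: r)] := by
  rw [pvStepB.eq_def]
  simp only
  rw [if_neg hs, if_pos hcm]

theorem pvStepB_n_block (c : Char) (r : List Char) (hs : ¬ PySem.Chars.isspace c = true)
    (hcm : ¬ (['/','/'] : List Char).isPrefixOf (c :: r) = true)
    (hb : (['<','&'] : List Char).isPrefixOf (c :: r) = true) :
    pvStepB (c :: r) .n = pvStepB r.tail (.b ['<','&']) := by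
  rw [pvStepB.eq_def]
  simp only
  rw [if_neg hs, if_neg hcm, if_pos hb]

theorem pvStepB_n_quote (c : Char) (r : List Char) (hs : ¬ PySem.Chars.isspace c = true)
    (hcm : ¬ (['/','/'] : List Char).isPrefixOf (c :: r) = true)
    (hb : ¬ (['<','&'] : List Char).isPrefixOf (c :: r) = true)
    (hq : c = '"') :
    pvStepB (c :: r) .n = pvStepB r (.q ['"']) := by
  rw [pvStepB.eq_def]
  simp only
  rw [if_neg hs, if_neg hcm, if_neg hb, if_pos hq]

theorem pvStepB_n_word (c : Char) (r : List Char) (hs : ¬ PySem.Chars.isspace c = true)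
    (hcm : ¬ (['/','/'] : List Char).isPrefixOf (c :: r) = true)
    (hb : ¬ (['<','&'] : List Char).isPrefixOf (c :: r) = true)
    (hq : ¬ c = '"') :
    pvStepB (c :: r) .n = pvStepB r (.w [c]) := by
  rw [pvStepB.eq_def]
  simp only
  rw [if_neg hs, if_neg hcm, if_neg hb, if_neg hq]

theorem pvTailDrop (cs : List Char) (i : Nat) : (cs.drop (i+1)).tail = cs.drop (i+2) := by
  rw [List.tail_drop]

theorem pvMain (cs : List Char) (i : Nat) : pvLoopA cs i = pvStepB (cs.drop i) .n := by
  fun_induction pvLoopA cs i with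
  | case1 i h hs ih =>
    rw [ih, pvDropCons h, pvStepB_n_ws _ _ hs]
  | case2 i h hs hcm =>
    have hcm' := hcm
    rw [pvDropCons h] at hcm'
    rw [pvDropCons h, pvStepB_n_comment _ _ hs ((pvPrefix2 '/' '/' _).2 hcm')]
  | case3 i h hs hcm hblk e hend =>
    have he : e = PySem.Chars.findFrom cs ['&','>'] ((i : Int) + 2) := rfl
    rw [he] at hend
    have hlen := pvTake2_len hblk
    have hblk' := hblk
    have hcm' := hcm
    rw [pvDropCons h] at hblk' hcm'
    have hcmB : ¬ (['/','/'] : List Char).isPrefixOf (cs[i] :: cs.drop (i+1)) = true :=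
      fun hx => hcm' ((pvPrefix2 _ _ _).1 hx)
    rw [pvDropCons h, pvStepB_n_block _ _ hs hcmB ((pvPrefix2 '<' '&' _).2 hblk'),
        pvTailDrop, pvBlockCorr]
    rw [show ((i : Int) + 2) = ((i + 2 : Nat) : Int) by push_cast; ring,
        PySem.Chars.findFrom_natCast cs ['&','>'] (i+2) hlen] at hend
    have hge := PySem.Chars.neg_one_le_find (cs.drop (i+2)) ['&','>']
    have hfind : PySem.Chars.find (cs.drop (i+2)) ['&','>'] = -1 := by
      by_contra hx
      rw [if_neg hx] at hend
      omega
    rw [if_pos hfind, ← pvDropCons h, pvTake2_drop hblk]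
    simp
  | case4 i h hs hcm hblk e hend ih =>
    have he : e = PySem.Chars.findFrom cs ['&','>'] ((i : Int) + 2) := rfl
    rw [he] at hend ih ⊢
    have hlen := pvTake2_len hblk
    have hblk' := hblk
    have hcm' := hcm
    rw [pvDropCons h] at hblk' hcm'
    have hcmB : ¬ (['/','/'] : List Char).isPrefixOf (cs[i] :: cs.drop (i+1)) = true :=
      fun hx => hcm' ((pvPrefix2 _ _ _).1 hx)
    rw [pvDropCons h, pvStepB_n_block _ _ hs hcmB ((pvPrefix2 '<' '&' _).2 hblk'),
        pvTailDrop, pvBlockCorr]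
    simp only [show ((i : Int) + 2) = ((i + 2 : Nat) : Int) by push_cast; ring,
        PySem.Chars.findFrom_natCast cs ['&','>'] (i+2) hlen] at hend ih ⊢
    have hge := PySem.Chars.neg_one_le_find (cs.drop (i+2)) ['&','>']
    have hfind : ¬ PySem.Chars.find (cs.drop (i+2)) ['&','>'] = -1 := by
      intro hx
      rw [if_pos hx] at hend
      exact hend rfl
    rw [if_neg hfind] at ih ⊢
    have h0 : 0 ≤ PySem.Chars.find (cs.drop (i+2)) ['&','>'] := by omega
    set f := PySem.Chars.find (cs.drop (i+2)) ['&','>'] with hfdef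
    have htn : (((i + 2 : Nat) : Int) + f).toNat = i + 2 + f.toNat := by omega
    rw [htn] at ih ⊢
    rw [ih, ← pvDropCons h, pvTake2_drop hblk,
        show i + 2 + f.toNat + 2 - i = (f.toNat + 2) + 1 + 1 by omega,
        List.take_succ_cons, List.take_succ_cons, List.drop_drop,
        show i + 2 + (f.toNat + 2) = i + 2 + f.toNat + 2 by omega]
    simp [hfind]
  | case5 i h hs hcm hblk hq j ih =>
    have hj : j = pvQuoteEnd cs (i+1) := rfl
    rw [hj] at ih ⊢
    have hblk' := hblk
    have hcm' := hcm
    rw [pvDropCons h] at hblk' hcm'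
    have hcmB : ¬ (['/','/'] : List Char).isPrefixOf (cs[i] :: cs.drop (i+1)) = true :=
      fun hx => hcm' ((pvPrefix2 _ _ _).1 hx)
    have hblkB : ¬ (['<','&'] : List Char).isPrefixOf (cs[i] :: cs.drop (i+1)) = true :=
      fun hx => hblk' ((pvPrefix2 _ _ _).1 hx)
    rw [pvDropCons h, pvStepB_n_quote _ _ hs hcmB hblkB hq, pvQuoteCorr cs (i+1) ['"']]
    have hge := pvQuoteEnd_ge cs (i + 1)
    split_ifs with hlt
    · rw [ih, show pvQuoteEnd cs (i+1) + 1 - i = (pvQuoteEnd cs (i+1) + 1 - (i+1)) + 1 by omega,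
          List.take_succ_cons, hq]
      simp
    · rw [ih, List.drop_eq_nil_of_le (show cs.length ≤ pvQuoteEnd cs (i+1) + 1 by omega)]
      rw [List.take_of_length_le (by simp; omega), hq]
      simp [pvStepB]
  | case6 i h hs hcm hblk hq j ih =>
    have hblk' := hblk
    have hcm' := hcm
    rw [pvDropCons h] at hblk' hcm'
    have hcmB : ¬ (['/','/'] : List Char).isPrefixOf (cs[i] :: cs.drop (i+1)) = true :=
      fun hx => hcm' ((pvPrefix2 _ _ _).1 hx)
    have hblkB : ¬ (['<','&'] : List Char).isPrefixOf (cs[i] :: cs.drop (i+1)) = true :=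
      fun hx => hblk' ((pvPrefix2 _ _ _).1 hx)
    have hstep : pvWordEnd cs i = pvWordEnd cs (i+1) := by
      rw [pvWordEnd.eq_def]
      rw [dif_pos h, if_pos ⟨hs, hq⟩, if_neg hblk]
    have hj : j = pvWordEnd cs (i+1) := hstep
    rw [hj] at ih ⊢
    have hge := pvWordEnd_ge cs (i + 1)
    rw [pvDropCons h, pvStepB_n_word _ _ hs hcmB hblkB hq, pvWordCorr cs (i+1) [cs[i]], ih,
        show pvWordEnd cs (i+1) - i = (pvWordEnd cs (i+1) - (i+1)) + 1 by omega,
        List.take_succ_cons]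
    simp
  | case7 i h =>
    rw [List.drop_eq_nil_of_le (by omega)]
    simp [pvStepB]

-- ===== VERDICT (by name: the statement is the Claim_ definition above) =====
theorem tokenize_line_py_spec : Claim_equal_tokenize_line_py := by
  intro line _
  unfold Spec_tokenize_line_py tokenize_line_py tokenize_line_py_alt
  simpa using pvMain (PySem.Str.strip line).toList 0
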